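-- pv_equiv track=rewrite | github.com/William9701/St-Philip-s | web_dynamic/app.py | binary_search_members
-- ===== SOURCE A (Python) =====
-- def binary_search_members(query, members):
--     exact_matches = []
--     partial_matches = []
--     query = query.lower().split()  # Split query into words
--
--     for member in members:
--         first_name = member["first_name"].lower()
--         last_name = member["last_name"].lower()
--         full_name = f"{first_name} {last_name}"
--
--         # Check for exact match with full name
--         if len(query) == 2 and query[0] == first_name and query[1] == last_name:
--             exact_matches.append(member)
--         # Check for partial match with each word in the query
--         elif any(word in first_name or word in last_name for word in query):
--             partial_matches.append(member)
--
--     # Return exact matches first, followed by partial matches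
--     return exact_matches + partial_matches
-- ===== SOURCE B (Python) =====
-- def binary_search_members(query, members):
--     q = query.lower().split()
--
--     def rank(m):
--         fn = m["first_name"].lower()
--         ln = m["last_name"].lower()
--         if len(q) == 2 and q[0] == fn and q[1] == ln:
--             return 0
--         if any(w in fn or w in ln for w in q):
--             return 1
--         return 2
--
--     # stable sort by rank: exact (0) first, then partial (1), each in original order
--     return sorted([m for m in members if rank(m) < 2], key=rank)
-- ===== Notes on version B (the rewrite author's own statement) =====
-- stated objective: alternative
-- what changed: Replaces A's single partitioning loop with two accumulator lists by a rank function (0 exact, 1 partial, 2 none) followed by filtering out rank 2 and a stable sort on the rank key, whose stability yields exact-then-partial in original order.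
import Mathlib
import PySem

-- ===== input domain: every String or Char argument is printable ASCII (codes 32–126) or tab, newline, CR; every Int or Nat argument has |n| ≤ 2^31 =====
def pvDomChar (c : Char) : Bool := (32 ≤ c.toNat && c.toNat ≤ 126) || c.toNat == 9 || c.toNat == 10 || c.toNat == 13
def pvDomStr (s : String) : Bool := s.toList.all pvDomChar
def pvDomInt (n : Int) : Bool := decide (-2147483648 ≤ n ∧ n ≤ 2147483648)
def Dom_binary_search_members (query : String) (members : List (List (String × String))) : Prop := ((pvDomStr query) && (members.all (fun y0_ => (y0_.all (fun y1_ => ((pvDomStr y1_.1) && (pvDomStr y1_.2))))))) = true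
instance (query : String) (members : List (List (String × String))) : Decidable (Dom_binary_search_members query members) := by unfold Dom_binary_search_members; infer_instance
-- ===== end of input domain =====

-- B replaces A's single partitioning loop (two growing accumulators) by a rank key
-- (0 exact / 1 partial / 2 none), a filter dropping rank 2, and a stable sort on the
-- rank key (alternative algorithm; not claimed faster).


-- ===== PORT A =====
-- member["k"]: first-match dict lookup; KeyError (= missing key) is excluded by Pre_,
-- so the default "" is never reached on admitted inputs.
def pvGetKey (m : List (String × String)) (k : String) : String :=
  (PySem.Dict.mk m).getD k ""

-- len(query)==2 and query[0]==first_name and query[1]==last_name  (indexing guarded by the length check)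
def pvExactCond (q : List String) (fn ln : String) : Bool :=
  (q.length == 2) && (q.getD 0 "" == fn) && (q.getD 1 "" == ln)

-- any(word in first_name or word in last_name for word in query)
def pvPartialCond (q : List String) (fn ln : String) : Bool :=
  q.any (fun w => PySem.Str.isIn w fn || PySem.Str.isIn w ln)

def binary_search_members (query : String) (members : List (List (String × String))) : List (List (String × String)) :=
  let q := PySem.Str.split₀ (PySem.Str.lower query)
  -- full_name is computed by A but never used; it is omitted here.
  let res := members.foldl (fun acc member =>
    let fn := PySem.Str.lower (pvGetKey member "first_name")
    let ln := PySem.Str.lower (pvGetKey member "last_name")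
    if pvExactCond q fn ln then (acc.1 ++ [member], acc.2)
    else if pvPartialCond q fn ln then (acc.1, acc.2 ++ [member])
    else acc) ([], [])
  res.1 ++ res.2

-- ===== PORT B =====
-- rank(m): 0 = exact match, 1 = partial match, 2 = no match
def pvRank (q : List String) (m : List (String × String)) : Int :=
  let fn := PySem.Str.lower (pvGetKey m "first_name")
  let ln := PySem.Str.lower (pvGetKey m "last_name")
  if pvExactCond q fn ln then 0
  else if pvPartialCond q fn ln then 1
  else 2

-- sorted([m for m in members if rank(m) < 2], key=rank): stable sort on the rank key
def binary_search_members_alt (query : String) (members : List (List (String × String))) : List (List (String × String)) :=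
  let q := PySem.Str.split₀ (PySem.Str.lower query)
  PySem.List.sorted (members.filter (fun m => decide (pvRank q m < 2))) (pvRank q) false

-- ===== PRECONDITION & SPEC =====
-- Pre_ excludes members missing a "first_name" or "last_name" key, on which A raises KeyError.
def Pre_binary_search_members (_query : String) (members : List (List (String × String))) : Prop :=
  (members.all (fun m => m.any (fun kv => kv.1 == "first_name") && m.any (fun kv => kv.1 == "last_name"))) = true
instance (query : String) (members : List (List (String × String))) : Decidable (Pre_binary_search_members query members) := by unfold Pre_binary_search_members; infer_instance

def pvWitness_binary_search_members : String × (List (List (String × String))) :=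
  ("john doe", [[("first_name", "John"), ("last_name", "Doe")], [("first_name", "Ann"), ("last_name", "Doe")]])

def Spec_binary_search_members (query : String) (members : List (List (String × String))) (out : List (List (String × String))) : Prop := out = binary_search_members_alt query members
instance (query : String) (members : List (List (String × String))) (out : List (List (String × String))) : Decidable (Spec_binary_search_members query members out) := by unfold Spec_binary_search_members; infer_instance

-- ===== CLAIM (what is proved, stated in full; the proofs are below) =====
def Claim_equal_binary_search_members : Prop := ∀ (query : String) (members : List (List (String × String))), Dom_binary_search_members query members → Pre_binary_search_members query members → Spec_binary_search_members query members (binary_search_members query members)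

-- ===== LEMMAS AND PROOFS =====

/-- A's partitioning loop is two filters: conditional appends to a pair of accumulators. -/
lemma pv_partition_foldl {α : Type} (c1 c2 : α → Bool) (ms : List α) (e p : List α) :
    ms.foldl (fun acc m =>
        if c1 m then (acc.1 ++ [m], acc.2)
        else if c2 m then (acc.1, acc.2 ++ [m])
        else acc) (e, p)
      = (e ++ ms.filter c1, p ++ ms.filter (fun m => c2 m && !c1 m)) := by
  induction ms generalizing e p with
  | nil => simp
  | cons x xs ih =>
    by_cases h1 : c1 x
    · simp [List.foldl_cons, h1, ih]
    · by_cases h2 : c2 x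
      · simp [List.foldl_cons, h1, h2, ih]
      · simp [List.foldl_cons, h1, h2, ih]

/-- Inserting x into zs ++ os where x goes after every z and before every o. -/
lemma pv_insertBy_mid {α : Type} (before : α → α → Bool) (x : α) (zs os : List α)
    (hz : ∀ z ∈ zs, before x z = false) (ho : ∀ o ∈ os, before x o = true) :
    PySem.List.insertBy before x (zs ++ os) = zs ++ x :: os := by
  induction zs with
  | nil =>
    cases os with
    | nil => simp [PySem.List.insertBy]
    | cons o os' => simp [PySem.List.insertBy, ho o (by simp)]
  | cons z zs' ih =>
    simp only [List.cons_append, PySem.List.insertBy, hz z (by simp)]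
    simp only [Bool.false_eq_true, if_false]
    rw [ih (fun z hzm => hz z (by simp [hzm]))]

/-- Stable insertion sort on a key taking only the values 0 and 1 is the two filters. -/
lemma pv_foldl_insert_two {α : Type} (rank : α → Int) (l : List α)
    (hr : ∀ x ∈ l, rank x = 0 ∨ rank x = 1) (zs os : List α)
    (hzs : ∀ z ∈ zs, rank z = 0) (hos : ∀ o ∈ os, rank o = 1) :
    l.foldl (fun acc x => PySem.List.insertBy (fun a b => decide (rank a < rank b)) x acc)
        (zs ++ os)
      = (zs ++ l.filter (fun x => rank x == 0)) ++ (os ++ l.filter (fun x => rank x == 1)) := by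
  induction l generalizing zs os with
  | nil => simp
  | cons x xs ih =>
    rcases hr x (by simp) with h0 | h1
    · have hins : PySem.List.insertBy (fun a b => decide (rank a < rank b)) x (zs ++ os)
          = (zs ++ [x]) ++ os := by
        rw [pv_insertBy_mid _ x zs os
          (fun z hz => by simp [h0, hzs z hz])
          (fun o hoo => by simp [h0, hos o hoo])]
        simp
      simp only [List.foldl_cons, hins]
      rw [ih (fun y hy => hr y (by simp [hy])) (zs ++ [x]) os
          (fun z hz => by
            rcases List.mem_append.mp hz with h | h
            · exact hzs z h
            · simp at h; simpa [h] using h0) hos]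
      simp [h0]
    · have hins : PySem.List.insertBy (fun a b => decide (rank a < rank b)) x (zs ++ os)
          = zs ++ (os ++ [x]) := by
        have h := pv_insertBy_mid (fun a b => decide (rank a < rank b)) x (zs ++ os) []
          (fun z hz => by
            rcases List.mem_append.mp hz with h | h
            · simp [h1, hzs z h]
            · simp [h1, hos z h]) (by simp)
        simpa using h
      simp only [List.foldl_cons, hins]
      rw [ih (fun y hy => hr y (by simp [hy])) zs (os ++ [x]) hzs
          (fun o hoo => by
            rcases List.mem_append.mp hoo with h | h
            · exact hos o h
            · simp at h; simpa [h] using h1)]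
      simp [h1]

/-- Stable sort of a list whose rank is everywhere 0 or 1. -/
lemma pv_sorted_two {α : Type} (rank : α → Int) (l : List α)
    (hr : ∀ x ∈ l, rank x = 0 ∨ rank x = 1) :
    PySem.List.sorted l rank false
      = l.filter (fun x => rank x == 0) ++ l.filter (fun x => rank x == 1) := by
  rw [PySem.List.sorted_eq_foldl_insertBy]
  simpa using pv_foldl_insert_two rank l hr [] [] (by simp) (by simp)

/-- B's filter-then-stable-sort on the 0/1/2 rank is A's exact/partial partition. -/
lemma pv_main {α : Type} (c1 c2 : α → Bool) (rank : α → Int)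
    (hrank : ∀ m, rank m = if c1 m then 0 else if c2 m then 1 else 2) (ms : List α) :
    PySem.List.sorted (ms.filter (fun m => decide (rank m < 2))) rank false
      = ms.filter c1 ++ ms.filter (fun m => c2 m && !c1 m) := by
  rw [pv_sorted_two rank _ (by
    intro x hx
    have hlt := of_decide_eq_true (List.mem_filter.mp hx).2
    rw [hrank] at hlt ⊢
    split_ifs at hlt ⊢ with h1 h2 <;> omega)]
  rw [List.filter_filter, List.filter_filter]
  congr 1
  · apply List.filter_congr
    intro m _
    simp only [hrank]
    split_ifs with h1 <;> simp [h1]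
  · apply List.filter_congr
    intro m _
    simp only [hrank]
    split_ifs <;> simp_all

-- ===== VERDICT (by name: the statement is the Claim_ definition above) =====
theorem binary_search_members_spec : Claim_equal_binary_search_members := by
  intro query members _ _
  unfold Spec_binary_search_members binary_search_members binary_search_members_alt
  simp only [pv_partition_foldl, List.nil_append]
  exact (pv_main
    (fun m => pvExactCond (PySem.Str.split₀ (PySem.Str.lower query))
      (PySem.Str.lower (pvGetKey m "first_name")) (PySem.Str.lower (pvGetKey m "last_name")))
    (fun m => pvPartialCond (PySem.Str.split₀ (PySem.Str.lower query))
      (PySem.Str.lower (pvGetKey m "first_name")) (PySem.Str.lower (pvGetKey m "last_name")))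
    (pvRank (PySem.Str.split₀ (PySem.Str.lower query)))
    (fun m => rfl) members).symm
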